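-- pv_equiv track=rewrite | github.com/YalcinkayaE/CIX | scripts/secondary_story.py | _find_edges_with_terms
-- ===== SOURCE A (Python) =====
-- from typing import Dict, Iterable, List, Sequence, Tuple
--
-- def _find_edges_with_terms(edges: Sequence[Dict[str, str]], terms: Iterable[str], limit: int = 8) -> List[Dict[str, str]]:
--     lowered_terms = [term.lower() for term in terms if term]
--     scored: List[Tuple[int, int, Dict[str, str]]] = []
--     if not lowered_terms:
--         return []
--     generic_rel = {"ON_HOST", "HAS_USER"}
--     for edge in edges:
--         s = edge.get("source", "")
--         t = edge.get("target", "")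
--         rel = edge.get("relationship", "")
--         blob = f"{s} {rel} {t}".lower()
--         term_hits = sum(1 for term in lowered_terms if term in blob)
--         if term_hits <= 0:
--             continue
--         relation_penalty = 0 if rel not in generic_rel else 1
--         # Higher term match, lower penalty first.
--         scored.append((-term_hits, relation_penalty, edge))
--     scored.sort(key=lambda item: (item[0], item[1]))
--     return [edge for _, _, edge in scored[:limit]]
-- ===== SOURCE B (Python) =====
-- from typing import Dict, Iterable, List, Sequence
--
--
-- def _find_edges_with_terms(edges: Sequence[Dict[str, str]], terms: Iterable[str], limit: int = 8) -> List[Dict[str, str]]: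
--     lowered_terms = [term.lower() for term in terms if term]
--     if not lowered_terms:
--         return []
--     generic_rel = {"ON_HOST", "HAS_USER"}
--     # Bucket matching edges by (term_hits, relation_penalty) in scan order.
--     buckets: Dict[tuple, List[Dict[str, str]]] = {}
--     for edge in edges:
--         s = edge.get("source", "")
--         t = edge.get("target", "")
--         rel = edge.get("relationship", "")
--         blob = f"{s} {rel} {t}".lower()
--         term_hits = sum(1 for term in lowered_terms if term in blob)
--         if term_hits > 0:
--             penalty = 1 if rel in generic_rel else 0
--             buckets.setdefault((term_hits, penalty), []).append(edge)
--     # Drain buckets: more hits first, penalty 0 before 1, insertion order within.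
--     ordered: List[Dict[str, str]] = []
--     for hits in range(len(lowered_terms), 0, -1):
--         for penalty in (0, 1):
--             ordered.extend(buckets.get((hits, penalty), ()))
--     return ordered[:limit]
-- ===== Notes on version B (the rewrite author's own statement) =====
-- stated objective: alternative
-- what changed: Replaces the comparison sort over scored edges with a counting/bucket scheme: one pass appends each matching edge to a bucket keyed by (term_hits, penalty), then the buckets are drained from highest hit count down, penalty 0 before 1, reproducing the stable sorted order without sorting.
import Mathlib
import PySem

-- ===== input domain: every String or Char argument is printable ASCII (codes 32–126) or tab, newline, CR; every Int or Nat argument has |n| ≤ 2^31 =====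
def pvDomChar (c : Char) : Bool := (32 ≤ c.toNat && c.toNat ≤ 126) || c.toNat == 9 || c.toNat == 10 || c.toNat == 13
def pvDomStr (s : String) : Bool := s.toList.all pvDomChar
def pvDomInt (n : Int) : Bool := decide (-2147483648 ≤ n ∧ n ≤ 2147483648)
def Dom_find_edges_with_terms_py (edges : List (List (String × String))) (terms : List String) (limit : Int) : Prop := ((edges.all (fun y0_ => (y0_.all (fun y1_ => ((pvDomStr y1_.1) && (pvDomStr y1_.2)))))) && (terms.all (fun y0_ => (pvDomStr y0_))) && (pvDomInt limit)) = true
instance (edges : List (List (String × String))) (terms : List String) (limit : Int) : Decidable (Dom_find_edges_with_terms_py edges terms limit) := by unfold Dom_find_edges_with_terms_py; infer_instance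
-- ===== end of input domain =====

-- B replaces A's comparison sort of scored edges by buckets keyed by (term_hits, penalty)
-- drained from highest hit count down (penalty 0 first), an alternative of similar cost.


-- ===== PORT A =====
-- These helper lines are IDENTICAL in both Pythons (A and B compute them verbatim),
-- so both ports share them.
-- [term.lower() for term in terms if term]
def pvLowered (terms : List String) : List String :=
  (terms.filter (fun t => !(t == ""))).map (fun t => PySem.Str.lower t)

-- generic_rel = {"ON_HOST", "HAS_USER"}
def pvGeneric : PySem.Set String := PySem.Set.ofList ["ON_HOST", "HAS_USER"]

-- blob = f"{s} {rel} {t}".lower()  (s, rel, t looked up with edge.get(…, ""))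
def pvBlob (edge : List (String × String)) : String :=
  PySem.Str.lower ((PySem.Dict.mk edge).getD "source" "" ++ " " ++
    (PySem.Dict.mk edge).getD "relationship" "" ++ " " ++
    (PySem.Dict.mk edge).getD "target" "")

-- term_hits = sum(1 for term in lowered_terms if term in blob)
def pvHits (lowered : List String) (edge : List (String × String)) : Int :=
  lowered.foldl (fun acc term => if PySem.Str.isIn term (pvBlob edge) then acc + 1 else acc) 0

-- relation_penalty = 0 if rel not in generic_rel else 1   (A)  /  1 if rel in generic_rel else 0   (B)
def pvPenalty (edge : List (String × String)) : Int :=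
  if !(PySem.Set.contains pvGeneric ((PySem.Dict.mk edge).getD "relationship" "")) then 0 else 1

def find_edges_with_terms_py (edges : List (List (String × String))) (terms : List String) (limit : Int) : List (List (String × String)) :=
  let lowered := pvLowered terms
  if lowered = [] then []
  else
    let scored : List (Int × Int × List (String × String)) :=
      edges.foldl (fun acc edge =>
        let th := pvHits lowered edge
        if th ≤ 0 then acc
        else acc ++ [(-th, pvPenalty edge, edge)]) []
    let sortedScored := PySem.List.sorted2 scored (fun it => it.1) (fun it => it.2.1)
    (PySem.List.slice sortedScored none (some limit)).map (fun it => it.2.2)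

-- ===== PORT B =====
def find_edges_with_terms_py_alt (edges : List (List (String × String))) (terms : List String) (limit : Int) : List (List (String × String)) :=
  let lowered := pvLowered terms
  if lowered = [] then []
  else
    -- buckets.setdefault((term_hits, penalty), []).append(edge)
    let buckets : PySem.Dict (Int × Int) (List (List (String × String))) :=
      edges.foldl (fun d edge =>
        let th := pvHits lowered edge
        if 0 < th then d.modify (th, pvPenalty edge) [] (fun l => l ++ [edge])
        else d) (PySem.Dict.mk [])
    -- for hits in range(len(lowered_terms), 0, -1): for penalty in (0, 1): ordered.extend(…)
    let ordered : List (List (String × String)) :=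
      (PySem.List.pyRange (lowered.length : Int) 0 (-1)).foldl (fun acc h =>
        ([0, 1] : List Int).foldl (fun acc2 pen => acc2 ++ buckets.getD (h, pen) []) acc) []
    PySem.List.slice ordered none (some limit)

-- ===== PRECONDITION & SPEC =====
def Spec_find_edges_with_terms_py (edges : List (List (String × String))) (terms : List String) (limit : Int) (out : List (List (String × String))) : Prop := out = find_edges_with_terms_py_alt edges terms limit
instance (edges : List (List (String × String))) (terms : List String) (limit : Int) (out : List (List (String × String))) : Decidable (Spec_find_edges_with_terms_py edges terms limit out) := by unfold Spec_find_edges_with_terms_py; infer_instance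

-- ===== CLAIM (what is proved, stated in full; the proofs are below) =====
def Claim_equal_find_edges_with_terms_py : Prop := ∀ (edges : List (List (String × String))) (terms : List String) (limit : Int), Dom_find_edges_with_terms_py edges terms limit → Spec_find_edges_with_terms_py edges terms limit (find_edges_with_terms_py edges terms limit)

-- ===== LEMMAS AND PROOFS =====

-- Python's lexicographic '<' on the 2-tuple keys, as sorted2's comparator computes it.
def pvLexLt (p q : Int × Int) : Bool :=
  decide (p.1 < q.1) || (!decide (q.1 < p.1) && decide (p.2 < q.2))

theorem pvLexLt_irrefl (p : Int × Int) : pvLexLt p p = false := by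
  simp [pvLexLt]

theorem pvLexLt_asymm {p q : Int × Int} (h : pvLexLt p q = true) : pvLexLt q p = false := by
  simp [pvLexLt] at *; omega

theorem pvLexLt_ne {p q : Int × Int} (h : pvLexLt p q = true) : p ≠ q := by
  rintro rfl; simp [pvLexLt_irrefl] at h

-- insertBy walks past a block it never inserts into
theorem insertBy_skip {α : Type} (before : α → α → Bool) (x : α) (b rest : List α)
    (h : ∀ y ∈ b, before x y = false) :
    PySem.List.insertBy before x (b ++ rest) = b ++ PySem.List.insertBy before x rest := by
  induction b with
  | nil => rfl
  | cons y ys ih =>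
    simp only [List.cons_append, PySem.List.insertBy, h y (by simp)]
    simp only [Bool.false_eq_true, if_false, List.cons.injEq, true_and]
    exact ih (fun z hz => h z (by simp [hz]))

theorem insertBy_front {α : Type} (before : α → α → Bool) (x : α) (rest : List α)
    (h : ∀ y ∈ rest, before x y = true) :
    PySem.List.insertBy before x rest = x :: rest := by
  cases rest with
  | nil => rfl
  | cons y ys => simp [PySem.List.insertBy, h y (by simp)]

-- inserting into the bucket decomposition appends x at the end of its own bucket
theorem insertBy_buckets {α : Type} (key : α → Int × Int) (x : α) (ks : List (Int × Int))
    (hks : ks.Pairwise (fun p q => pvLexLt p q = true)) (hmem : key x ∈ ks) (p : List α) :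
    PySem.List.insertBy (fun a b => pvLexLt (key a) (key b)) x
      (ks.flatMap (fun k => p.filter (fun y => key y == k))) =
    ks.flatMap (fun k => (p ++ [x]).filter (fun y => key y == k)) := by
  induction ks generalizing p with
  | nil => simp at hmem
  | cons k ks' ih =>
    rcases List.pairwise_cons.mp hks with ⟨hhead, htail⟩
    simp only [List.flatMap_cons]
    by_cases hxk : key x = k
    · rw [insertBy_skip _ x _ _ (fun y hy => by
        have : key y = k := by simpa using (List.mem_filter.mp hy).2
        rw [hxk, this, pvLexLt_irrefl])]
      rw [insertBy_front _ x _ (fun y hy => by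
        rcases List.mem_flatMap.mp hy with ⟨k', hk', hy'⟩
        have hky : key y = k' := by simpa using (List.mem_filter.mp hy').2
        rw [hxk, hky]; exact hhead k' hk')]
      have h1 : (p ++ [x]).filter (fun y => key y == k) = p.filter (fun y => key y == k) ++ [x] := by
        simp [List.filter_append, hxk]
      have h2 : ks'.flatMap (fun k' => (p ++ [x]).filter (fun y => key y == k')) =
          ks'.flatMap (fun k' => p.filter (fun y => key y == k')) := by
        refine List.flatMap_congr (fun k' hk' => ?_)
        have : key x ≠ k' := hxk ▸ pvLexLt_ne (hhead k' hk')
        simp [List.filter_append, this]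
      rw [h1, h2]; simp
    · have hx' : key x ∈ ks' := by
        rcases List.mem_cons.mp hmem with h | h
        · exact absurd h hxk
        · exact h
      rw [insertBy_skip _ x _ _ (fun y hy => by
        have hky : key y = k := by simpa using (List.mem_filter.mp hy).2
        have : pvLexLt k (key x) = true := hhead _ hx'
        rw [hky]; exact pvLexLt_asymm this)]
      rw [ih htail hx' p]
      have h1 : (p ++ [x]).filter (fun y => key y == k) = p.filter (fun y => key y == k) := by
        simp [List.filter_append, hxk]
      rw [h1]

-- stable insertion sort of xs into lex-sorted buckets IS the bucket decomposition
theorem foldl_insertBy_buckets {α : Type} (key : α → Int × Int) (ks : List (Int × Int))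
    (hks : ks.Pairwise (fun p q => pvLexLt p q = true)) (xs : List α)
    (hcov : ∀ x ∈ xs, key x ∈ ks) (p : List α) :
    xs.foldl (fun acc x => PySem.List.insertBy (fun a b => pvLexLt (key a) (key b)) x acc)
      (ks.flatMap (fun k => p.filter (fun y => key y == k))) =
    ks.flatMap (fun k => (p ++ xs).filter (fun y => key y == k)) := by
  induction xs generalizing p with
  | nil => simp
  | cons x xs' ih =>
    rw [List.foldl_cons, insertBy_buckets key x ks hks (hcov x (by simp)) p]
    have := ih (fun y hy => hcov y (by simp [hy])) (p ++ [x])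
    simpa [List.append_assoc] using this

theorem sorted2_eq_foldl {α : Type} (xs : List (Int × Int × α)) :
    PySem.List.sorted2 xs (fun it => it.1) (fun it => it.2.1) =
    xs.foldl (fun acc x =>
      PySem.List.insertBy (fun a b => pvLexLt (a.1, a.2.1) (b.1, b.2.1)) x acc) [] := rfl

theorem pvLexLt_of_fst_lt {p q : Int × Int} (h : p.1 < q.1) : pvLexLt p q = true := by
  simp [pvLexLt]; omega

-- the drain order: key pairs for hit counts T, T-1, …, 1, each with penalty 0 then 1
def pvKs (T : Int) : List (Int × Int) :=
  (PySem.List.pyRange T 0 (-1)).flatMap (fun h => [(-h, 0), (-h, 1)])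

theorem pairs_flatMap_pairwise (hs : List Int) (hhs : hs.Pairwise (fun a b => b < a)) :
    (hs.flatMap (fun h => [((-h : Int), (0 : Int)), (-h, 1)])).Pairwise
      (fun p q => pvLexLt p q = true) := by
  induction hs with
  | nil => simp
  | cons h hs' ihh =>
    rcases List.pairwise_cons.mp hhs with ⟨hhead, htail⟩
    simp only [List.flatMap_cons]
    rw [List.pairwise_append]
    refine ⟨?_, ihh htail, ?_⟩
    · simp [pvLexLt]
    · intro a ha b hb
      rcases List.mem_flatMap.mp hb with ⟨h', hh', hb'⟩
      have h1 : a.1 = -h := by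
        simp only [List.mem_cons, List.not_mem_nil, or_false] at ha
        rcases ha with rfl | rfl <;> rfl
      have h2 : b.1 = -h' := by
        simp only [List.mem_cons, List.not_mem_nil, or_false] at hb'
        rcases hb' with rfl | rfl <;> rfl
      exact pvLexLt_of_fst_lt (by rw [h1, h2]; have := hhead h' hh'; omega)

theorem pvKs_pairwise (T : Int) : (pvKs T).Pairwise (fun p q => pvLexLt p q = true) := by
  refine pairs_flatMap_pairwise _ ?_
  rw [PySem.List.pyRange_neg_one_eq_reverse, List.pairwise_reverse]
  exact PySem.List.pairwise_lt_pyRange_one _ _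

theorem mem_pvKs {T th pen : Int} (h1 : 0 < th) (h2 : th ≤ T) (h3 : pen = 0 ∨ pen = 1) :
    ((-th, pen) : Int × Int) ∈ pvKs T := by
  unfold pvKs
  refine List.mem_flatMap.mpr ⟨th, PySem.List.mem_pyRange_neg_one.mpr ⟨h1, h2⟩, ?_⟩
  rcases h3 with rfl | rfl <;> simp

theorem pvHits_eq_countP (lowered : List String) (edge : List (String × String)) :
    pvHits lowered edge =
      (lowered.countP (fun term => PySem.Str.isIn term (pvBlob edge)) : Int) := by
  unfold pvHits
  have := PySem.List.foldl_if_add_one (fun term => PySem.Str.isIn term (pvBlob edge)) lowered 0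
  simpa using this

theorem pvHits_le (lowered : List String) (edge : List (String × String)) :
    pvHits lowered edge ≤ (lowered.length : Int) := by
  rw [pvHits_eq_countP]
  exact_mod_cast List.countP_le_length ..

theorem pvPenalty_cases (edge : List (String × String)) :
    pvPenalty edge = 0 ∨ pvPenalty edge = 1 := by
  unfold pvPenalty; split <;> simp

-- a dict of appended buckets, read back
theorem dict_fold_getD {E : Type} (key : E → Int × Int) (l : List E)
    (d : PySem.Dict (Int × Int) (List E)) (k : Int × Int) :
    (l.foldl (fun d e => d.modify (key e) [] (fun b => b ++ [e])) d).getD k [] =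
      d.getD k [] ++ l.filter (fun e => key e == k) := by
  induction l generalizing d with
  | nil => simp
  | cons e l' ih =>
    rw [List.foldl_cons, ih]
    by_cases hk : key e = k
    · rw [List.filter_cons_of_pos (by simp [hk])]
      rw [hk, PySem.Dict.getD_modify_self]
      simp
    · rw [List.filter_cons_of_neg (by simp [hk])]
      rw [PySem.Dict.getD_modify_of_ne _ _ _ (fun h => hk h.symm)]

theorem slice_map_comm {α β : Type} (f : α → β) (xs : List α) (lim : Int) :
    PySem.List.slice (xs.map f) none (some lim) = (PySem.List.slice xs none (some lim)).map f := by
  simp [PySem.List.slice, List.map_take]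

theorem pvNegKey (a b h p : Int) : (((-a, b) : Int × Int) == (-h, p)) = (((a, b) : Int × Int) == (h, p)) := by
  show ((-a == -h) && (b == p)) = ((a == h) && (b == p))
  by_cases hah : a = h
  · subst hah; simp
  · have h1 : ((-a : Int) == -h) = false := beq_eq_false_iff_ne.mpr (by omega)
    have h2 : ((a : Int) == h) = false := beq_eq_false_iff_ne.mpr hah
    rw [h1, h2]

-- the per-bucket content of A's sorted list, projected back to edges
theorem bucket_map (lowered : List String) (kept : List (List (String × String))) (h p : Int) :
    (((kept.map (fun e => (-(pvHits lowered e), pvPenalty e, e))).filter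
        (fun t => ((t.1, t.2.1) : Int × Int) == (-h, p))).map (fun t => t.2.2))
    = kept.filter (fun e => ((pvHits lowered e, pvPenalty e) : Int × Int) == (h, p)) := by
  rw [List.filter_map, List.map_map]
  have hid : ((fun t : Int × Int × List (String × String) => t.2.2) ∘
      (fun e => (-(pvHits lowered e), pvPenalty e, e))) = id := rfl
  rw [hid, List.map_id]
  refine List.filter_congr (fun e _ => ?_)
  show (((-(pvHits lowered e), pvPenalty e) : Int × Int) == (-h, p)) = _
  exact pvNegKey (pvHits lowered e) (pvPenalty e) h p

theorem find_edges_with_terms_py_spec : Claim_equal_find_edges_with_terms_py := by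
  intro edges terms limit _
  unfold Spec_find_edges_with_terms_py
  simp only [find_edges_with_terms_py, find_edges_with_terms_py_alt]
  by_cases hL : pvLowered terms = []
  · simp [hL]
  · simp only [if_neg hL]
    set lowered := pvLowered terms with hlow
    set kept := edges.filter (fun e => decide (0 < pvHits lowered e)) with hkept
    -- A's scan is kept, encoded
    have hscored :
        edges.foldl (fun acc edge =>
          if pvHits lowered edge ≤ 0 then acc
          else acc ++ [(-(pvHits lowered edge), pvPenalty edge, edge)])
          ([] : List (Int × Int × List (String × String)))
        = kept.map (fun e => (-(pvHits lowered e), pvPenalty e, e)) := by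
      have hfn : (fun (acc : List (Int × Int × List (String × String))) edge =>
          if pvHits lowered edge ≤ 0 then acc
          else acc ++ [(-(pvHits lowered edge), pvPenalty edge, edge)])
        = (fun acc edge => if 0 < pvHits lowered edge then
            acc ++ [(-(pvHits lowered edge), pvPenalty edge, edge)] else acc) := by
        funext acc edge
        by_cases h : pvHits lowered edge ≤ 0
        · rw [if_pos h, if_neg (not_lt.mpr h)]
        · rw [if_neg h, if_pos (not_le.mp h)]
      rw [hfn, PySem.List.foldl_append_ite (fun e => 0 < pvHits lowered e) _ edges []]
      rw [List.nil_append, hkept]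
    -- every scored key lies in the drain order
    have hcov : ∀ t ∈ kept.map (fun e => (-(pvHits lowered e), pvPenalty e, e)),
        ((t.1, t.2.1) : Int × Int) ∈ pvKs (lowered.length : Int) := by
      intro t ht
      rcases List.mem_map.mp ht with ⟨e, he, rfl⟩
      have h0 : 0 < pvHits lowered e := by
        rw [hkept] at he
        simpa using (List.mem_filter.mp he).2
      exact mem_pvKs h0 (pvHits_le lowered e) (pvPenalty_cases e)
    -- A's stable sort is the bucket decomposition
    have hsorted :
        PySem.List.sorted2 (kept.map (fun e => (-(pvHits lowered e), pvPenalty e, e)))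
          (fun it => it.1) (fun it => it.2.1)
        = (pvKs (lowered.length : Int)).flatMap (fun k =>
            (kept.map (fun e => (-(pvHits lowered e), pvPenalty e, e))).filter
              (fun t => ((t.1, t.2.1) : Int × Int) == k)) := by
      rw [sorted2_eq_foldl]
      have := foldl_insertBy_buckets (fun t : Int × Int × List (String × String) => (t.1, t.2.1))
        (pvKs (lowered.length : Int)) (pvKs_pairwise _)
        (kept.map (fun e => (-(pvHits lowered e), pvPenalty e, e))) hcov []
      simp only [List.filter_nil] at this
      rw [show List.flatMap (fun _ : Int × Int => ([] : List (Int × Int × List (String × String))))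
          (pvKs (lowered.length : Int)) = [] from by simp] at this
      simpa using this
    -- B's bucket dict, read back
    have hbuckets : ∀ k : Int × Int,
        (edges.foldl (fun d edge =>
            if 0 < pvHits lowered edge then
              d.modify (pvHits lowered edge, pvPenalty edge) [] (fun l => l ++ [edge])
            else d) (PySem.Dict.mk [])).getD k []
        = kept.filter (fun e => ((pvHits lowered e, pvPenalty e) : Int × Int) == k) := by
      intro k
      rw [PySem.List.foldl_ite_eq_foldl_filter (fun e => 0 < pvHits lowered e) _ edges _, ← hkept]
      simpa using dict_fold_getD (fun e => (pvHits lowered e, pvPenalty e)) kept (PySem.Dict.mk []) k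
    rw [hscored, hsorted, ← slice_map_comm, List.map_flatMap]
    simp only [hbuckets]
    unfold pvKs
    rw [List.flatMap_assoc]
    simp only [List.flatMap_cons, List.flatMap_nil, List.append_nil]
    simp only [bucket_map]
    simp only [List.foldl_cons, List.foldl_nil, List.append_assoc]
    rw [PySem.List.foldl_append_eq_flatMap (fun h =>
      kept.filter (fun e => ((pvHits lowered e, pvPenalty e) : Int × Int) == (h, 0)) ++
      kept.filter (fun e => ((pvHits lowered e, pvPenalty e) : Int × Int) == (h, 1)))]
    rw [List.nil_append]
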